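-- pv_equiv track=rewrite | github.com/ourresearch/openalex-guts | util.py | pick_best_url
-- ===== SOURCE A (Python) =====
-- def pick_best_url(urls):
--     if not urls:
--         return None
--
--     #get a backup
--     response = urls[0]
--
--     # now go through and pick the best one
--     for url in urls:
--         # doi if available
--         if "doi.org" in url:
--             response = url
--
--         # anything else if what we currently have is bogus
--         if response == "http://www.ncbi.nlm.nih.gov/pmc/articles/PMC":
--             response = url
--
--     return response
-- ===== SOURCE B (Python) =====
-- BOGUS = "http://www.ncbi.nlm.nih.gov/pmc/articles/PMC"
--
--
-- def pick_best_url(urls):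
--     if not urls:
--         return None
--     dois = [u for u in urls if "doi.org" in u]
--     if dois:
--         return dois[-1]
--     return next((u for u in urls if u != BOGUS), urls[-1])
-- ===== Notes on version B (the rewrite author's own statement) =====
-- stated objective: simpler
-- what changed: Replaces the interleaved two-if accumulator loop with two separate phases: filter the doi.org URLs and take the last, otherwise return the first non-bogus URL (falling back to the last URL).
import Mathlib
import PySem

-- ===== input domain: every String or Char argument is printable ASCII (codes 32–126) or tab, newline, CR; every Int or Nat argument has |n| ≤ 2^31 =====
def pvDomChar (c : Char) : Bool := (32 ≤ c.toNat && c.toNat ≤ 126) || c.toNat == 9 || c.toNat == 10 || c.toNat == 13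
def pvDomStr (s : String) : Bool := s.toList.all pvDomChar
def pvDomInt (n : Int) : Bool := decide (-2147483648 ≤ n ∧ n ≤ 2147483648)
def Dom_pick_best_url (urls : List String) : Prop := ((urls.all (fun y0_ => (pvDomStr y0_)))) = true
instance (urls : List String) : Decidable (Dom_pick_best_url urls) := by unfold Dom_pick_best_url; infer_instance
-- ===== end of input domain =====

-- B replaces A's interleaved two-if accumulator loop by two phases: last doi.org URL
-- if any, else first non-bogus URL (falling back to the last URL); objective: simpler.

def pvBogus : String := "http://www.ncbi.nlm.nih.gov/pmc/articles/PMC"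

-- ===== PORT A =====
def pvStepA (response url : String) : String :=
  let response := if PySem.Str.isIn "doi.org" url then url else response
  if response = pvBogus then url else response

def pick_best_url (urls : List String) : Option String :=
  match urls with
  | [] => none
  | u0 :: _ => some (urls.foldl pvStepA u0)

-- ===== PORT B =====
def pick_best_url_alt (urls : List String) : Option String :=
  if urls = [] then none
  else
    let dois := urls.filter (fun u => PySem.Str.isIn "doi.org" u)
    if dois ≠ [] then dois.getLast?
    else
      match urls.find? (fun u => u ≠ pvBogus) with
      | some u => some u
      | none => urls.getLast?

-- ===== PRECONDITION & SPEC =====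
def Spec_pick_best_url (urls : List String) (out : Option String) : Prop := out = pick_best_url_alt urls
instance (urls : List String) (out : Option String) : Decidable (Spec_pick_best_url urls out) := by unfold Spec_pick_best_url; infer_instance

-- ===== CLAIM (what is proved, stated in full; the proofs are below) =====
def Claim_equal_pick_best_url : Prop := ∀ (urls : List String), Dom_pick_best_url urls → Spec_pick_best_url urls (pick_best_url urls)

-- ===== LEMMAS AND PROOFS =====

-- a URL containing "doi.org" is never the bogus string
theorem pvDoi_ne_bogus : ∀ u, PySem.Str.isIn "doi.org" u = true → u ≠ pvBogus := by
  intro u h he; subst he; revert h; decide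

-- characterisation of A's fold (over an abstract predicate p that never holds on pvBogus):
-- last p-element if any; else, starting from bogus, the first non-bogus element (or the
-- last element if all are bogus); starting from non-bogus r, just r.
theorem pvFold_char_gen (p : String → Bool) (hp : ∀ u, p u = true → u ≠ pvBogus)
    (xs : List String) (r : String) :
    xs.foldl (fun response url =>
      let response := if p url then url else response
      if response = pvBogus then url else response) r =
      match (xs.filter p).getLast? with
      | some d => d
      | none =>
        if r = pvBogus then
          match xs.find? (fun u => u ≠ pvBogus) with
          | some u => u
          | none => xs.getLast?.getD r
        else r := by
  induction xs generalizing r with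
  | nil =>
    simp only [List.foldl_nil, List.filter_nil, List.getLast?_nil]
    split_ifs <;> rfl
  | cons x xs ih =>
    simp only [List.foldl_cons]
    by_cases hpx : p x = true
    case pos =>
      have hxb : x ≠ pvBogus := hp x hpx
      rw [show (if (if p x = true then x else r) = pvBogus then x
            else if p x = true then x else r) = x from by simp [hpx, hxb]]
      rw [ih x]
      rw [show (x :: xs).filter p = x :: xs.filter p from by simp [hpx]]
      cases hfl : (xs.filter p).getLast? with
      | some d =>
        rw [show (x :: xs.filter p).getLast? = some d from by
          rw [List.getLast?_cons, hfl]; rfl]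
      | none =>
        rw [List.getLast?_eq_none_iff.mp hfl]
        simp only [List.getLast?_singleton, if_neg hxb]
    case neg =>
      by_cases hr : r = pvBogus
      · rw [show (if (if p x = true then x else r) = pvBogus then x
              else if p x = true then x else r) = x from by simp [hpx, hr]]
        rw [ih x]
        rw [show (x :: xs).filter p = xs.filter p from by simp [hpx]]
        cases hfl : (xs.filter p).getLast? with
        | some d => rfl
        | none =>
          simp only [if_pos hr]
          by_cases hxb : x = pvBogus
          · rw [show (x :: xs).find? (fun u => u ≠ pvBogus)
                  = xs.find? (fun u => u ≠ pvBogus) from by simp [hxb],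
               show (x :: xs).getLast?.getD r = xs.getLast?.getD x from by
                 rw [List.getLast?_cons]; cases xs.getLast? <;> simp [hxb, hr]]
            rw [if_pos hxb]
          · rw [show (x :: xs).find? (fun u => u ≠ pvBogus) = some x from by simp [hxb]]
            rw [if_neg hxb]
      · rw [show (if (if p x = true then x else r) = pvBogus then x
              else if p x = true then x else r) = r from by simp [hpx, hr]]
        rw [ih r]
        rw [show (x :: xs).filter p = xs.filter p from by simp [hpx]]
        cases (xs.filter p).getLast? with
        | some d => rfl
        | none => simp only [if_neg hr]

-- the characterisation specialised to A's actual step function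
theorem pvFoldA_char (xs : List String) (r : String) :
    xs.foldl pvStepA r =
      match (xs.filter (fun u => PySem.Str.isIn "doi.org" u)).getLast? with
      | some d => d
      | none =>
        if r = pvBogus then
          match xs.find? (fun u => u ≠ pvBogus) with
          | some u => u
          | none => xs.getLast?.getD r
        else r :=
  pvFold_char_gen (fun u => PySem.Str.isIn "doi.org" u) pvDoi_ne_bogus xs r

-- ===== VERDICT (by name: the statement is the Claim_ definition above) =====
theorem pick_best_url_spec : Claim_equal_pick_best_url := by
  intro urls _
  unfold Spec_pick_best_url pick_best_url pick_best_url_alt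
  cases urls with
  | nil => rfl
  | cons u0 rest =>
    change some ((u0 :: rest).foldl pvStepA u0) =
      (if ((u0 :: rest).filter (fun u => PySem.Str.isIn "doi.org" u)) ≠ [] then
         ((u0 :: rest).filter (fun u => PySem.Str.isIn "doi.org" u)).getLast?
       else
         match (u0 :: rest).find? (fun u => u ≠ pvBogus) with
         | some u => some u
         | none => (u0 :: rest).getLast?)
    rw [pvFoldA_char]
    cases hfl : ((u0 :: rest).filter (fun u => PySem.Str.isIn "doi.org" u)).getLast? with
    | some d =>
      have hne : (u0 :: rest).filter (fun u => PySem.Str.isIn "doi.org" u) ≠ [] := by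
        intro h; rw [h] at hfl; simp at hfl
      rw [if_pos hne]
    | none =>
      have hnil : (u0 :: rest).filter (fun u => PySem.Str.isIn "doi.org" u) = [] :=
        List.getLast?_eq_none_iff.mp hfl
      rw [if_neg (show ¬((u0 :: rest).filter (fun u => PySem.Str.isIn "doi.org" u) ≠ []) from
        fun h => h hnil)]
      by_cases hb : u0 = pvBogus
      · rw [if_pos hb]
        cases hfind : (u0 :: rest).find? (fun u => u ≠ pvBogus) with
        | some u => rfl
        | none => rw [List.getLast?_cons]; rfl
      · rw [if_neg hb,
           show (u0 :: rest).find? (fun u => u ≠ pvBogus) = some u0 from by simp [hb]]
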